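-- pv_equiv track=rewrite | github.com/zia1138/rayevolve | src/rayevolve/edit/apply_diff.py | _char_to_line_num
-- ===== SOURCE A (Python) =====
-- def _char_to_line_num(text: str, char_pos: int) -> int:
--     """Convert character position to line number (1-based)."""
--     if char_pos < 0:
--         return 1
--
--     lines = text.splitlines(keepends=True)
--     current_pos = 0
--     for i, line in enumerate(lines):
--         if current_pos + len(line) > char_pos:
--             return i + 1
--         current_pos += len(line)
--
--     return len(lines) if lines else 1
-- ===== SOURCE B (Python) =====
-- def _char_to_line_num(text: str, char_pos: int) -> int:
--     """Convert character position to line number (1-based)."""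
--     lines = text.splitlines(keepends=True)
--     if not lines:
--         return 1
--     # prefix sums: cumulative end offset after each line
--     ends = []
--     total = 0
--     for line in lines:
--         total += len(line)
--         ends.append(total)
--     # binary search: first index whose cumulative end exceeds char_pos
--     lo, hi = 0, len(ends)
--     while lo < hi:
--         mid = (lo + hi) // 2
--         if char_pos < ends[mid]:
--             hi = mid
--         else:
--             lo = mid + 1
--     return min(lo + 1, len(lines))
-- ===== Notes on version B (the rewrite author's own statement) =====
-- stated objective: alternative
-- what changed: Replaces A's linear accumulate-and-scan with early return by a prefix-sum array plus a binary search (bisect_right by hand) clamped to the line count; the negative guard disappears because bisect returns 0 there.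
import Mathlib
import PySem

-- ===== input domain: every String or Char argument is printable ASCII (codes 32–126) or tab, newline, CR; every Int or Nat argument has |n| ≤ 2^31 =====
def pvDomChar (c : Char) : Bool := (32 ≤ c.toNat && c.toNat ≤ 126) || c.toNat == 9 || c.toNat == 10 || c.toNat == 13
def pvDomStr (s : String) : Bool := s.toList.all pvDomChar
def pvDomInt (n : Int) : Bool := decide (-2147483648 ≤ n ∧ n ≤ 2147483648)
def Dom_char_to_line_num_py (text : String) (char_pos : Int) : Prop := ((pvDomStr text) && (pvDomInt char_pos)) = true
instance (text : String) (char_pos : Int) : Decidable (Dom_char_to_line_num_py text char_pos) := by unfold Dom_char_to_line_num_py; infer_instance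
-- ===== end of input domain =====

-- B replaces A's linear accumulate-and-scan by prefix sums + a hand-written binary search; same return value everywhere.

-- ===== PORT A =====
-- text.splitlines(keepends=True), hand-ported (exact on the Dom alphabet, where the
-- only line boundaries Python recognises are '\n', '\r' and '\r\n'); acc holds the
-- current line reversed.  Used verbatim by both ports (both Pythons call splitlines).
def pvSplitKeep : List Char → List Char → List (List Char)
  | [], acc => if acc.isEmpty then [] else [acc.reverse]
  | '\n' :: rest, acc => (acc.reverse ++ ['\n']) :: pvSplitKeep rest []
  | '\r' :: '\n' :: rest, acc => (acc.reverse ++ ['\r', '\n']) :: pvSplitKeep rest []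
  | '\r' :: rest, acc => (acc.reverse ++ ['\r']) :: pvSplitKeep rest []
  | c :: rest, acc => pvSplitKeep rest (c :: acc)

-- A's 'for i, line in enumerate(lines)' loop with its early return
def pvALoop (cp : Int) : List (List Char) → Int → Int → Option Int
  | [], _, _ => none
  | l :: rest, i, cur =>
    if cur + (l.length : Int) > cp then some (i + 1)
    else pvALoop cp rest (i + 1) (cur + (l.length : Int))

def char_to_line_num_py (text : String) (char_pos : Int) : Int :=
  if char_pos < 0 then 1
  else
    let lines := pvSplitKeep text.toList []
    (pvALoop char_pos lines 0 0).getD (if lines.isEmpty then 1 else (lines.length : Int))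

-- ===== PORT B =====
-- Source B's prefix-sum loop: running total after each line
def pvEnds : List (List Char) → Int → List Int
  | [], _ => []
  | l :: rest, total => (total + (l.length : Int)) :: pvEnds rest (total + (l.length : Int))

-- Source B's while-loop binary search (bisect_right)
def pvBisect (a : List Int) (x : Int) (lo hi : Nat) : Nat :=
  if _h : lo < hi then
    let mid := (lo + hi) / 2
    if x < a.getD mid 0 then pvBisect a x lo mid
    else pvBisect a x (mid + 1) hi
  else lo
termination_by hi - lo

def char_to_line_num_py_alt (text : String) (char_pos : Int) : Int :=
  let lines := pvSplitKeep text.toList []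
  if lines.isEmpty then 1
  else
    let ends := pvEnds lines 0
    let idx := pvBisect ends char_pos 0 ends.length
    min ((idx : Int) + 1) ((lines.length : Int))

-- ===== PRECONDITION & SPEC =====
def Spec_char_to_line_num_py (text : String) (char_pos : Int) (out : Int) : Prop := out = char_to_line_num_py_alt text char_pos
instance (text : String) (char_pos : Int) (out : Int) : Decidable (Spec_char_to_line_num_py text char_pos out) := by unfold Spec_char_to_line_num_py; infer_instance

-- ===== CLAIM (what is proved, stated in full; the proofs are below) =====
def Claim_equal_char_to_line_num_py : Prop := ∀ (text : String) (char_pos : Int), Dom_char_to_line_num_py text char_pos → Spec_char_to_line_num_py text char_pos (char_to_line_num_py text char_pos)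

-- ===== LEMMAS AND PROOFS =====

lemma pvEnds_length (ls : List (List Char)) (t : Int) : (pvEnds ls t).length = ls.length := by
  induction ls generalizing t with
  | nil => rfl
  | cons l rest ih => simp [pvEnds, ih]

lemma pvEnds_mem_le (ls : List (List Char)) (t : Int) : ∀ x ∈ pvEnds ls t, t ≤ x := by
  induction ls generalizing t with
  | nil => simp [pvEnds]
  | cons l rest ih =>
    intro x hx
    simp only [pvEnds, List.mem_cons] at hx
    rcases hx with h | h
    · omega
    · have := ih (t + (l.length : Int)) x h; omega

lemma pvEnds_pairwise (ls : List (List Char)) (t : Int) : (pvEnds ls t).Pairwise (· ≤ ·) := by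
  induction ls generalizing t with
  | nil => simp [pvEnds]
  | cons l rest ih =>
    simp only [pvEnds, List.pairwise_cons]
    refine ⟨fun x hx => ?_, ih _⟩
    have := pvEnds_mem_le rest (t + (l.length : Int)) x hx; omega

-- threshold characterisation of countP on a nondecreasing list
lemma sorted_getD_le_iff (a : List Int) (x : Int) (h : a.Pairwise (· ≤ ·)) :
    ∀ j, j < a.length → (a.getD j 0 ≤ x ↔ j < a.countP (fun e => decide (e ≤ x))) := by
  induction a with
  | nil => intro j hj; simp at hj
  | cons b r ih =>
    rcases List.pairwise_cons.mp h with ⟨hb, hr⟩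
    intro j hj
    rw [List.countP_cons]
    by_cases hbx : b ≤ x
    · have hd : (decide (b ≤ x)) = true := decide_eq_true hbx
      rw [hd, if_pos rfl]
      cases j with
      | zero => simpa using hbx
      | succ j =>
        have hj' : j < r.length := by simpa using hj
        have H := ih hr j hj'
        rw [List.getD_cons_succ]
        omega
    · have hd : (decide (b ≤ x)) = false := decide_eq_false hbx
      rw [hd, if_neg Bool.false_ne_true]
      have hr0 : r.countP (fun e => decide (e ≤ x)) = 0 := by
        apply List.countP_eq_zero.mpr
        intro e he
        have := hb e he
        simp; omega
      rw [hr0]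
      cases j with
      | zero => simpa using hbx
      | succ j =>
        have hj' : j < r.length := by simpa using hj
        have hm : r.getD j 0 ∈ r := by
          rw [List.getD_eq_getElem r 0 hj']; exact List.getElem_mem hj'
        have := hb _ hm
        rw [List.getD_cons_succ]
        constructor
        · intro hle; omega
        · intro hlt; omega

lemma pvBisect_eq (a : List Int) (x : Int) (h : a.Pairwise (· ≤ ·)) :
    ∀ n lo hi, hi - lo ≤ n → lo ≤ a.countP (fun e => decide (e ≤ x)) →
      a.countP (fun e => decide (e ≤ x)) ≤ hi → hi ≤ a.length →
      pvBisect a x lo hi = a.countP (fun e => decide (e ≤ x)) := by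
  intro n
  induction n with
  | zero =>
    intro lo hi hfuel h1 h2 h3
    rw [pvBisect]
    have : ¬ lo < hi := by omega
    simp [this]; omega
  | succ n ih =>
    intro lo hi hfuel h1 h2 h3
    rw [pvBisect]
    by_cases hlt : lo < hi
    · simp only [hlt, dif_pos]
      set k := a.countP (fun e => decide (e ≤ x)) with hk
      set mid := (lo + hi) / 2 with hmid
      have hmlt : mid < hi := by omega
      have hmge : lo ≤ mid := by omega
      have hmlen : mid < a.length := by omega
      by_cases hx : x < a.getD mid 0
      · simp only [hx, if_pos]
        have hkm : k ≤ mid := by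
          by_contra hc
          have : a.getD mid 0 ≤ x := (sorted_getD_le_iff a x h mid hmlen).mpr (by omega)
          omega
        exact ih lo mid (by omega) h1 hkm (by omega)
      · simp only [hx, if_neg, not_false_iff]
        have hkm : mid < k := by
          have : a.getD mid 0 ≤ x := by omega
          exact (sorted_getD_le_iff a x h mid hmlen).mp this
        exact ih (mid + 1) hi (by omega) (by omega) h2 h3
    · simp [hlt]; omega

-- A's loop returns some (i + k + 1) where k counts the running ends ≤ cp, none if all ≤ cp
lemma pvALoop_eq (cp : Int) (ls : List (List Char)) (i cur : Int) :
    pvALoop cp ls i cur =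
      if (pvEnds ls cur).countP (fun e => decide (e ≤ cp)) < ls.length
      then some (i + ((pvEnds ls cur).countP (fun e => decide (e ≤ cp)) : Int) + 1)
      else none := by
  induction ls generalizing i cur with
  | nil => simp [pvALoop, pvEnds]
  | cons l rest ih =>
    simp only [pvALoop, pvEnds, List.countP_cons, List.length_cons]
    by_cases hgt : cur + (l.length : Int) > cp
    · -- head end > cp; every later end is ≥ it, so the count is 0
      have h0 : (pvEnds rest (cur + (l.length : Int))).countP (fun e => decide (e ≤ cp)) = 0 := by
        apply List.countP_eq_zero.mpr
        intro e he
        have := pvEnds_mem_le rest (cur + (l.length : Int)) e he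
        simp; omega
      have hd : (decide (cur + (l.length : Int) ≤ cp)) = false := by simp; omega
      rw [if_pos hgt, h0, hd]
      simp
    · have hhead : cur + (l.length : Int) ≤ cp := by omega
      have hd : (decide (cur + (l.length : Int) ≤ cp)) = true := decide_eq_true hhead
      rw [if_neg hgt, ih, hd, if_pos rfl]
      set c := (pvEnds rest (cur + (l.length : Int))).countP (fun e => decide (e ≤ cp)) with hc
      by_cases hlt : c < rest.length
      · rw [if_pos hlt, if_pos (by omega)]
        congr 1
        push_cast
        ring
      · rw [if_neg hlt, if_neg (by omega)]

-- ===== VERDICT (by name: the statement is the Claim_ definition above) =====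
theorem char_to_line_num_py_spec : Claim_equal_char_to_line_num_py := by
  intro text cp _hdom
  unfold Spec_char_to_line_num_py
  simp only [char_to_line_num_py, char_to_line_num_py_alt]
  set ls := pvSplitKeep text.toList [] with hls
  by_cases hempty : ls.isEmpty
  · have hnil : ls = [] := List.isEmpty_iff.mp hempty
    simp [hnil, pvALoop]
  · have hne : ls ≠ [] := fun h => hempty (by simp [h])
    have hlen : 0 < ls.length := List.length_pos_iff.mpr hne
    simp only [if_neg hempty]
    set k := (pvEnds ls 0).countP (fun e => decide (e ≤ cp)) with hk
    have hklen : k ≤ ls.length := by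
      have := List.countP_le_length (l := pvEnds ls 0) (p := fun e => decide (e ≤ cp))
      rw [pvEnds_length] at this; omega
    have hbis : pvBisect (pvEnds ls 0) cp 0 (pvEnds ls 0).length = k := by
      apply pvBisect_eq (pvEnds ls 0) cp (pvEnds_pairwise ls 0) (pvEnds ls 0).length
      · omega
      · omega
      · rw [pvEnds_length]; omega
      · omega
    rw [hbis]
    by_cases hneg : cp < 0
    · -- negative position: every end is ≥ 0 > cp, so k = 0 and the min is 1
      have hk0 : k = 0 := by
        rw [hk]
        apply List.countP_eq_zero.mpr
        intro e he
        have := pvEnds_mem_le ls 0 e he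
        simp; omega
      rw [if_pos hneg, hk0]
      rw [show ((0 : ℕ) : Int) + 1 = 1 by simp]
      rw [min_eq_left (by omega)]

    · rw [if_neg hneg, pvALoop_eq]
      by_cases hlt : k < ls.length
      · rw [if_pos hlt, Option.getD_some]
        rw [min_eq_left (by omega : (k : Int) + 1 ≤ (ls.length : Int))]
        omega
      · rw [if_neg hlt, Option.getD_none]
        rw [min_eq_right (by omega : (ls.length : Int) ≤ (k : Int) + 1)]
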